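-- pv_equiv track=rewrite | github.com/ashutoshdebug/yaplate | app/nlp/glossary.py | build_reference
-- ===== SOURCE A (Python) =====
-- def build_reference(target_lang: str):
--     """
--     Returns reference data for Lingo.dev.
--
--     Structure:
--     {
--       "ja": {"GitHub": "GitHub", "Pull Request": "プルリクエスト"},
--       "hi": {"GitHub": "GitHub", "Pull Request": "पुल रिक्वेस्ट"}
--     }
--     """
--     if not target_lang:
--         return {}
--
--     target_lang = target_lang.strip().lower()
--
--     BASE = {
--         "GitHub": {
--             "ja": "GitHub",
--             "hi": "GitHub",
--         },
--         "Pull Request": {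
--             "ja": "プルリクエスト",
--             "hi": "पुल रिक्वेस्ट",
--         },
--         "FastAPI": {
--             "ja": "FastAPI",
--             "hi": "FastAPI",
--         },
--     }
--
--     reference = {}
--
--     for term, langs in BASE.items():
--         if target_lang in langs:
--             reference.setdefault(target_lang, {})[term] = langs[target_lang]
--
--     return reference
-- ===== SOURCE B (Python) =====
-- def build_reference(target_lang: str):
--     """Reference data pre-keyed by language: one direct lookup instead of a loop."""
--     if not target_lang:
--         return {}
--
--     target_lang = target_lang.strip().lower()
--
--     DATA = {
--         "ja": {"GitHub": "GitHub", "Pull Request": "プルリクエスト", "FastAPI": "FastAPI"},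
--         "hi": {"GitHub": "GitHub", "Pull Request": "पुल रिक्वेस्ट", "FastAPI": "FastAPI"},
--     }
--
--     inner = DATA.get(target_lang)
--     if inner is None:
--         return {}
--     return {target_lang: dict(inner)}
-- ===== Notes on version B (the rewrite author's own statement) =====
-- stated objective: simpler
-- what changed: Replaces the per-term loop with setdefault over a term-keyed table by a single lookup in a table pre-keyed by language, returning a fresh copy of the inner dict.
import Mathlib
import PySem

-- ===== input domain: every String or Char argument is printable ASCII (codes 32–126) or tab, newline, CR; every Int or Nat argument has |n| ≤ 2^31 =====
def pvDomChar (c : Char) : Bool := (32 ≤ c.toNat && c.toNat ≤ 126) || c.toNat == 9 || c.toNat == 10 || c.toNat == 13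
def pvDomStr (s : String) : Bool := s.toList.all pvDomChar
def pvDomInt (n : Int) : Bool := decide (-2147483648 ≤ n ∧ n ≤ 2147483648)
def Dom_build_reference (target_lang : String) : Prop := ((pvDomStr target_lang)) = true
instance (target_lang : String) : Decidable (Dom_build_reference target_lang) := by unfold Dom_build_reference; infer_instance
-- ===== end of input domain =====

-- B replaces A's loop over a term-keyed table by a single lookup in a language-keyed table (simpler).

-- ===== PORT A =====
def build_reference (target_lang : String) : List (String × List (String × String)) :=
  if target_lang == "" then []
  else
    let t := PySem.Str.lower (PySem.Str.strip target_lang)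
    let BASE : PySem.Dict String (PySem.Dict String String) :=
      PySem.Dict.ofList
        [("GitHub", PySem.Dict.ofList [("ja", "GitHub"), ("hi", "GitHub")]),
         ("Pull Request", PySem.Dict.ofList [("ja", "プルリクエスト"), ("hi", "पुल रिक्वेस्ट")]),
         ("FastAPI", PySem.Dict.ofList [("ja", "FastAPI"), ("hi", "FastAPI")])]
    let reference : PySem.Dict String (PySem.Dict String String) :=
      BASE.items.foldl
        (fun ref p =>
          if p.2.contains t then
            -- langs[target_lang] is guarded by the contains test, so get? is always some; getD "" is exact here
            ref.insert t ((ref.getD t PySem.Dict.empty).insert p.1 (p.2.getD t ""))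
          else ref)
        PySem.Dict.empty
    reference.items.map (fun p => (p.1, p.2.items))

-- ===== PORT B =====
def build_reference_alt (target_lang : String) : List (String × List (String × String)) :=
  if target_lang == "" then []
  else
    let t := PySem.Str.lower (PySem.Str.strip target_lang)
    let DATA : PySem.Dict String (List (String × String)) :=
      PySem.Dict.ofList
        [("ja", [("GitHub", "GitHub"), ("Pull Request", "プルリクエスト"), ("FastAPI", "FastAPI")]),
         ("hi", [("GitHub", "GitHub"), ("Pull Request", "पुल रिक्वेस्ट"), ("FastAPI", "FastAPI")])]
    match DATA.get? t with
    | none => []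
    | some inner => [(t, inner)]

-- ===== PRECONDITION & SPEC =====
def Spec_build_reference (target_lang : String) (out : List (String × List (String × String))) : Prop := out = build_reference_alt target_lang
instance (target_lang : String) (out : List (String × List (String × String))) : Decidable (Spec_build_reference target_lang out) := by unfold Spec_build_reference; infer_instance

-- ===== CLAIM (what is proved, stated in full; the proofs are below) =====
def Claim_equal_build_reference : Prop := ∀ (target_lang : String), Dom_build_reference target_lang → Spec_build_reference target_lang (build_reference target_lang)

-- ===== LEMMAS AND PROOFS =====

-- ===== VERDICT (by name: the statement is the Claim_ definition above) =====
theorem build_reference_spec : Claim_equal_build_reference := by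
  intro s _
  unfold Spec_build_reference build_reference build_reference_alt
  cases hs : s == "" with
  | true => simp
  | false =>
    simp only [Bool.false_eq_true, if_false]
    generalize PySem.Str.lower (PySem.Str.strip s) = t
    by_cases hja : t = "ja"
    · subst hja; decide
    · by_cases hhi : t = "hi"
      · subst hhi; decide
      · have h1 : ("ja" == t) = false := by simp; exact fun h => hja h.symm
        have h2 : ("hi" == t) = false := by simp; exact fun h => hhi h.symm
        simp [PySem.Dict.ofList, PySem.Dict.update, PySem.Dict.insert, PySem.Dict.empty,
              PySem.Dict.contains, PySem.Dict.get?, List.foldl, h1, h2]
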